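-- pv_equiv track=rewrite | github.com/Len-dh/-Automatic-referencing-from-Fusion | ChangeRefComponentV2.py | GetListToFinalList3
-- ===== SOURCE A (Python) =====
-- def GetListToFinalList3(ui, labelList, LabelBom):
--     GetListToFinalListPart3 = []
--     functionalAreaList = []
--     assemblyList = []
--     subAssemblyList= []
--     partList = []
--     GetListToFinalListPart3 = []
--     i_list = []
--     TreeBom3 = []
--
--     for i, (functionalArea, assembly, subAssembly, part) in enumerate(labelList):
--         if subAssembly == 'SUB_ASS' and functionalArea == 'N0':
--             functionalAreaList.append(functionalArea)
--             assemblyList.append(assembly)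
--             subAssemblyList.append(subAssembly)
--             partList.append(part)
--             i_list.append(i)
--             TreeBom3.append(LabelBom[i])
--         else:
--             continue
--
--         GetListToFinalListPart3 = list(zip(functionalAreaList, assemblyList, subAssemblyList, partList, i_list))
--     return GetListToFinalListPart3, TreeBom3
-- ===== SOURCE B (Python) =====
-- def GetListToFinalList3(ui, labelList, LabelBom):
--     # Backward index scan collecting matches, reversed at the end; the second
--     # output is then derived from the stored indices of the first output.
--     final = []
--     for i in range(len(labelList) - 1, -1, -1):
--         functionalArea, assembly, subAssembly, part = labelList[i]
--         if subAssembly == 'SUB_ASS' and functionalArea == 'N0':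
--             final.append((functionalArea, assembly, subAssembly, part, i))
--     final.reverse()
--     return final, [LabelBom[t[4]] for t in final]
-- ===== Notes on version B (the rewrite author's own statement) =====
-- stated objective: alternative
-- what changed: Replaces A's forward fused loop over six growing parallel accumulator lists (re-zipped after every match) with a backward index scan that collects only the matching rows, reverses the collected list, and then derives the second output from the indices stored in the first.
import Mathlib
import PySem

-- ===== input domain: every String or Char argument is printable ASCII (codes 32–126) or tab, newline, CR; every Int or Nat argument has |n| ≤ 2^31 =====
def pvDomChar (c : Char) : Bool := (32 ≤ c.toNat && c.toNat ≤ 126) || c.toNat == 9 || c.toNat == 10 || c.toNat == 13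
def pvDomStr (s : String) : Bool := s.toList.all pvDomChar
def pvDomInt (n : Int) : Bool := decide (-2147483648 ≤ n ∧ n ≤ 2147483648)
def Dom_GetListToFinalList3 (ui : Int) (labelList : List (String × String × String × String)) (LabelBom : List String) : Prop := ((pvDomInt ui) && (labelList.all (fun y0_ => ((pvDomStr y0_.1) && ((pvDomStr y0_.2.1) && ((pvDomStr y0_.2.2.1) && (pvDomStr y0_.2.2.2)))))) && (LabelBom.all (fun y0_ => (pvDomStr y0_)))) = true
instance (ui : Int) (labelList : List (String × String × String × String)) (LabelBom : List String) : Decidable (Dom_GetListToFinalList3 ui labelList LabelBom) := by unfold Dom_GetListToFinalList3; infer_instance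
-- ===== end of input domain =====

-- B replaces A's forward fused loop over six growing parallel lists (re-zipped after every
-- match) by a backward index scan collecting only the matching rows, reversed at the end,
-- with the second output derived afterwards from the stored indices (objective: alternative).

-- ===== PORT A =====
-- loop state: (functionalAreaList, assemblyList, subAssemblyList, partList, i_list, TreeBom3, GetListToFinalListPart3)
def pvStateA : Type := List String × List String × List String × List String × List Int × List String × List (String × String × String × String × Int)

def pvStepA (LabelBom : List String) (st : pvStateA) (p : Int × String × String × String × String) : pvStateA :=
  let (i, functionalArea, assembly, subAssembly, part) := p
  if subAssembly == "SUB_ASS" && functionalArea == "N0" then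
    let fa := st.1 ++ [functionalArea]
    let asm := st.2.1 ++ [assembly]
    let sub := st.2.2.1 ++ [subAssembly]
    let prt := st.2.2.2.1 ++ [part]
    let il := st.2.2.2.2.1 ++ [i]
    let tree := st.2.2.2.2.2.1 ++ [PySem.List.pyGetD LabelBom i ""]  -- LabelBom[i]; total form, exact under Pre_
    (fa, asm, sub, prt, il, tree, fa.zip (asm.zip (sub.zip (prt.zip il))))  -- list(zip(...)) of the five lists
  else st

def GetListToFinalList3 (ui : Int) (labelList : List (String × String × String × String)) (LabelBom : List String) : (List (String × String × String × String × Int)) × List String :=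
  let st := (PySem.List.enumerate labelList 0).foldl (pvStepA LabelBom) ([], [], [], [], [], [], [])
  (st.2.2.2.2.2.2, st.2.2.2.2.2.1)

-- ===== PORT B =====
def GetListToFinalList3_alt (ui : Int) (labelList : List (String × String × String × String)) (LabelBom : List String) : (List (String × String × String × String × Int)) × List String :=
  -- for i in range(len(labelList) - 1, -1, -1): … append matching rows …
  let final0 := (PySem.List.pyRange ((labelList.length : Int) - 1) (-1) (-1)).foldl
    (fun acc i =>
      let r := PySem.List.pyGetD labelList i ("", "", "", "")  -- labelList[i]
      if r.2.2.1 == "SUB_ASS" && r.1 == "N0" then acc ++ [(r.1, r.2.1, r.2.2.1, r.2.2.2, i)] else acc) []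
  let final := final0.reverse  -- final.reverse()
  (final, final.map (fun t => PySem.List.pyGetD LabelBom t.2.2.2.2 ""))  -- [LabelBom[t[4]] for t in final]

-- helper shared by Pre_ (the match test of a row, on enumerated pairs)
def pvMatchB (p : Int × String × String × String × String) : Bool :=
  p.2.2.2.1 == "SUB_ASS" && p.2.1 == "N0"

-- ===== PRECONDITION & SPEC =====
-- Pre_ excludes exactly the inputs where Python A raises IndexError: a matching row whose index is out of range of LabelBom.
def Pre_GetListToFinalList3 (ui : Int) (labelList : List (String × String × String × String)) (LabelBom : List String) : Prop :=
  ∀ p ∈ PySem.List.enumerate labelList 0, pvMatchB p = true → PySem.Raise.InRange LabelBom.length p.1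
instance (ui : Int) (labelList : List (String × String × String × String)) (LabelBom : List String) : Decidable (Pre_GetListToFinalList3 ui labelList LabelBom) := by unfold Pre_GetListToFinalList3; infer_instance

def pvWitness_GetListToFinalList3 : Int × (List (String × String × String × String)) × List String :=
  (0, [("N0", "a", "SUB_ASS", "p"), ("N1", "b", "SUB_ASS", "q")], ["x", "y"])

def Spec_GetListToFinalList3 (ui : Int) (labelList : List (String × String × String × String)) (LabelBom : List String) (out : (List (String × String × String × String × Int)) × List String) : Prop := out = GetListToFinalList3_alt ui labelList LabelBom
instance (ui : Int) (labelList : List (String × String × String × String)) (LabelBom : List String) (out : (List (String × String × String × String × Int)) × List String) : Decidable (Spec_GetListToFinalList3 ui labelList LabelBom out) := by unfold Spec_GetListToFinalList3; infer_instance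

-- ===== CLAIM (what is proved, stated in full; the proofs are below) =====
def Claim_equal_GetListToFinalList3 : Prop := ∀ (ui : Int) (labelList : List (String × String × String × String)) (LabelBom : List String), Dom_GetListToFinalList3 ui labelList LabelBom → Pre_GetListToFinalList3 ui labelList LabelBom → Spec_GetListToFinalList3 ui labelList LabelBom (GetListToFinalList3 ui labelList LabelBom)

-- ===== LEMMAS AND PROOFS =====

-- loop invariant for A's fold
theorem pvLoopA (LabelBom : List String) (l : List (Int × String × String × String × String))
    (a1 a2 a3 a4 : List String) (a5 : List Int) (tr : List String)
    (fin : List (String × String × String × String × Int)) :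
    l.foldl (pvStepA LabelBom) (a1, a2, a3, a4, a5, tr, fin) =
      (a1 ++ (l.filter pvMatchB).map (·.2.1),
       a2 ++ (l.filter pvMatchB).map (·.2.2.1),
       a3 ++ (l.filter pvMatchB).map (·.2.2.2.1),
       a4 ++ (l.filter pvMatchB).map (·.2.2.2.2),
       a5 ++ (l.filter pvMatchB).map (·.1),
       tr ++ (l.filter pvMatchB).map (fun p => PySem.List.pyGetD LabelBom p.1 ""),
       if (l.filter pvMatchB).isEmpty then fin
       else (a1 ++ (l.filter pvMatchB).map (·.2.1)).zip
            ((a2 ++ (l.filter pvMatchB).map (·.2.2.1)).zip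
             ((a3 ++ (l.filter pvMatchB).map (·.2.2.2.1)).zip
              ((a4 ++ (l.filter pvMatchB).map (·.2.2.2.2)).zip
               (a5 ++ (l.filter pvMatchB).map (·.1)))))) := by
  induction l generalizing a1 a2 a3 a4 a5 tr fin with
  | nil => simp
  | cons p l ih =>
    obtain ⟨i, fa, asm, sub, part⟩ := p
    by_cases h : (sub == "SUB_ASS" && fa == "N0") = true
    · have hm : pvMatchB (i, fa, asm, sub, part) = true := h
      simp only [List.foldl_cons, pvStepA]
      rw [if_pos h, ih, List.filter_cons_of_pos (by simp [hm])]
      by_cases he : (List.filter pvMatchB l).isEmpty = true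
      · have h0 := List.isEmpty_iff.mp he
        simp [h0]
      · simp [he, List.append_assoc]
    · have hm : pvMatchB (i, fa, asm, sub, part) = false := by
        simpa [pvMatchB] using h
      simp only [List.foldl_cons, pvStepA]
      rw [if_neg h, ih, List.filter_cons_of_neg (by simp [hm])]

theorem pvZipMap {α β γ δ ε ζ : Type} (l : List α) (f1 : α → β) (f2 : α → γ) (f3 : α → δ)
    (f4 : α → ε) (f5 : α → ζ) :
    (l.map f1).zip ((l.map f2).zip ((l.map f3).zip ((l.map f4).zip (l.map f5)))) =
      l.map (fun x => (f1 x, f2 x, f3 x, f4 x, f5 x)) := by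
  simp [List.zip_map']

-- B's loop, rewritten to the canonical filtered-enumerate form
theorem pvAltEq (ui : Int) (labelList : List (String × String × String × String)) (LabelBom : List String) :
    GetListToFinalList3_alt ui labelList LabelBom =
      (((PySem.List.enumerate labelList 0).filter pvMatchB).map
         (fun p => (p.2.1, p.2.2.1, p.2.2.2.1, p.2.2.2.2, p.1)),
       ((PySem.List.enumerate labelList 0).filter pvMatchB).map
         (fun p => PySem.List.pyGetD LabelBom p.1 "")) := by
  unfold GetListToFinalList3_alt
  rw [PySem.List.foldl_append_if]
  have hrange : PySem.List.pyRange ((labelList.length : Int) - 1) (-1) (-1)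
      = (PySem.List.pyRange 0 (labelList.length : Int) 1).reverse := by
    rw [PySem.List.pyRange_neg_one_eq_reverse]; norm_num
  rw [hrange]
  simp only [PySem.List.enumerate_eq_map_pyRange labelList ("", "", "", ""), PySem.List.len_eq,
      List.filter_map, List.map_map, List.filter_reverse, List.map_reverse]
  simp [Function.comp_def, pvMatchB]

-- ===== VERDICT (by name: the statement is the Claim_ definition above) =====
theorem GetListToFinalList3_spec : Claim_equal_GetListToFinalList3 := by
  intro ui labelList LabelBom _ _
  show _ = _
  rw [pvAltEq]
  unfold GetListToFinalList3
  rw [pvLoopA]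
  simp only [List.nil_append]
  refine Prod.ext ?_ rfl
  · rw [pvZipMap]
    by_cases h : ((PySem.List.enumerate labelList 0).filter pvMatchB).isEmpty
    · rw [if_pos h]
      rw [List.isEmpty_iff] at h
      simp [h]
    · rw [if_neg h]
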